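-- pv_equiv track=rewrite | github.com/hackingmaterials/robocrystallographer | robocrys/util.py | superscript_number
-- ===== SOURCE A (Python) =====
-- def superscript_number(string):
--     """Converts a string containing numbers to superscript.
--
--     Will only convert the numbers 0-9, and the + and - characters.
--
--     Args:
--         string: A string containing the numbers 0-9 or +/- characters.
--
--     Returns:
--         The superscript string.
--     """
--
--     if '.' in string:
--         # no unicode period exists
--         return string
--
--     subscript_unicode_map = {0: '⁰', 1: '¹', 2: '²', 3: '³', 4: '⁴', 5: '⁵',
--                              6: '⁶', 7: '⁷', 8: '⁸', 9: '⁹', "-": "⁻", "+": "⁺"}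
--
--     for original_subscript, subscript_unicode in subscript_unicode_map.items():
--         string = string.replace(str(original_subscript), subscript_unicode)
--
--     return string
-- ===== SOURCE B (Python) =====
-- def superscript_number(string):
--     """Converts a string containing numbers to superscript (single-pass table lookup)."""
--     if '.' in string:
--         # no unicode period exists
--         return string
--
--     mapping = {'0': '⁰', '1': '¹', '2': '²', '3': '³', '4': '⁴', '5': '⁵',
--                '6': '⁶', '7': '⁷', '8': '⁸', '9': '⁹', '-': '⁻', '+': '⁺'}
--     return ''.join(mapping.get(c, c) for c in string)
-- ===== Notes on version B (the rewrite author's own statement) =====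
-- stated objective: idiomatic
-- what changed: B replaces A's 12 successive full-string str.replace passes with one dict from characters to superscript glyphs and a single join over the input, looking each character up once.
import Mathlib
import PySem

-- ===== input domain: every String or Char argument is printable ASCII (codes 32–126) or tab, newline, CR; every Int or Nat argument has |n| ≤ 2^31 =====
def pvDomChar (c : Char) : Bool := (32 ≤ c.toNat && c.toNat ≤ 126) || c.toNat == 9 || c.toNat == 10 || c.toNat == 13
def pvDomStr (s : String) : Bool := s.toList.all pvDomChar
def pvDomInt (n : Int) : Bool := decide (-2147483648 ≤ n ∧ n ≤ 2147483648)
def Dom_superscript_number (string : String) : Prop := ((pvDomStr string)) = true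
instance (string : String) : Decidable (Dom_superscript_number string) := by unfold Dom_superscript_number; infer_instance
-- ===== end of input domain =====

-- B changes A's 12 successive full-string replace passes into one single pass with a
-- character→glyph table (objective: idiomatic; same results, no speed claim).

-- ===== PORT A =====
-- A iterates over the dict's items in insertion order; keys 0–9 pass through str(),
-- so the iteration is exactly this list of (pattern, replacement) string pairs.
def supItems : List (String × String) :=
  [("0", "⁰"), ("1", "¹"), ("2", "²"), ("3", "³"), ("4", "⁴"), ("5", "⁵"),
   ("6", "⁶"), ("7", "⁷"), ("8", "⁸"), ("9", "⁹"), ("-", "⁻"), ("+", "⁺")]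

def superscript_number (string : String) : String :=
  if PySem.Str.isIn "." string then string
  else supItems.foldl (fun s pr => PySem.Str.replace s pr.1 pr.2) string

-- ===== PORT B =====
-- B's mapping dict: char keys to one-character superscript glyphs.
def supDict : PySem.Dict Char Char :=
  ⟨[('0', '⁰'), ('1', '¹'), ('2', '²'), ('3', '³'), ('4', '⁴'), ('5', '⁵'),
    ('6', '⁶'), ('7', '⁷'), ('8', '⁸'), ('9', '⁹'), ('-', '⁻'), ('+', '⁺')]⟩

-- ''.join(mapping.get(c, c) for c in string): every glyph is a single code point,
-- so the join is the string of the per-character lookups.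
def superscript_number_alt (string : String) : String :=
  if PySem.Str.isIn "." string then string
  else String.ofList (string.toList.map (fun c => supDict.getD c c))

-- ===== PRECONDITION & SPEC =====
def Spec_superscript_number (string : String) (out : String) : Prop := out = superscript_number_alt string
instance (string : String) (out : String) : Decidable (Spec_superscript_number string out) := by unfold Spec_superscript_number; infer_instance

-- ===== CLAIM (what is proved, stated in full; the proofs are below) =====
def Claim_equal_superscript_number : Prop := ∀ (string : String), Dom_superscript_number string → Spec_superscript_number string (superscript_number string)

-- ===== LEMMAS AND PROOFS =====

-- a single-character replace with a single-character replacement is a map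
lemma go_single (p q : Char) : ∀ (l : List Char) (fuel : Nat) (acc : List Char),
    l.length ≤ fuel →
    PySem.Chars.replace.go [p] [q] fuel l acc
      = acc.reverse ++ l.map (fun c => if c = p then q else c) := by
  intro l
  induction l with
  | nil =>
      intro fuel acc _
      cases fuel <;> simp [PySem.Chars.replace.go]
  | cons c t ih =>
      intro fuel acc h
      cases fuel with
      | zero => simp at h
      | succ m =>
          simp only [PySem.Chars.replace.go]
          by_cases hc : c = p
          · subst hc
            have hpre : [c].isPrefixOf (c :: t) = true := by
              simp [List.isPrefixOf]
            rw [hpre, if_pos rfl]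
            simp only [List.length_cons, List.length_nil, List.drop_succ_cons,
              List.drop_zero, List.reverse_cons, List.reverse_nil, List.nil_append]
            rw [ih m ([q] ++ acc) (by simpa using h)]
            simp
          · have hpre : [p].isPrefixOf (c :: t) = false := by
              simp [List.isPrefixOf]
              exact fun e => hc e.symm
            rw [hpre, if_neg (by simp)]
            rw [ih m _ (by simpa using h)]
            simp [hc]

lemma replace_single (s : List Char) (p q : Char) :
    PySem.Chars.replace s [p] [q] = s.map (fun c => if c = p then q else c) := by
  unfold PySem.Chars.replace
  rw [if_neg (by simp)]
  rw [go_single p q s s.length [] le_rfl]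
  simp

-- proof-only helper: B's table restricted to its first k entries
def tblUpTo (k : Nat) (c : Char) : Char :=
  PySem.Dict.getD ⟨List.take k supDict.items⟩ c c

-- pushing one single-character replace through an already-mapped list
lemma map_step (l : List Char) (p q : Char) (g g' : Char → Char)
    (h : ∀ c, (if g c = p then q else g c) = g' c) :
    (l.map g).map (fun c => if c = p then q else c) = l.map g' := by
  rw [List.map_map]
  exact List.map_congr_left (fun a _ => h a)

lemma step0 (c : Char) : (if c = '0' then '⁰' else c) = tblUpTo 1 c := by
  by_cases h0 : c = '0'; · subst h0; decide
  simp [tblUpTo, supDict, PySem.Dict.getD, PySem.Dict.get?, List.find?, h0,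
    beq_eq_false_iff_ne.mpr (Ne.symm h0)]

lemma step1 (c : Char) :
    (if tblUpTo 1 c = '1' then '¹' else tblUpTo 1 c) = tblUpTo 2 c := by
  by_cases h0 : c = '0'; · subst h0; decide
  by_cases h1 : c = '1'; · subst h1; decide
  simp [tblUpTo, supDict, PySem.Dict.getD, PySem.Dict.get?, List.take, List.find?, h1,
    beq_eq_false_iff_ne.mpr (Ne.symm h0),
    beq_eq_false_iff_ne.mpr (Ne.symm h1)]

lemma step2 (c : Char) :
    (if tblUpTo 2 c = '2' then '²' else tblUpTo 2 c) = tblUpTo 3 c := by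
  by_cases h0 : c = '0'; · subst h0; decide
  by_cases h1 : c = '1'; · subst h1; decide
  by_cases h2 : c = '2'; · subst h2; decide
  simp [tblUpTo, supDict, PySem.Dict.getD, PySem.Dict.get?, List.take, List.find?, h2,
    beq_eq_false_iff_ne.mpr (Ne.symm h0),
    beq_eq_false_iff_ne.mpr (Ne.symm h1),
    beq_eq_false_iff_ne.mpr (Ne.symm h2)]

lemma step3 (c : Char) :
    (if tblUpTo 3 c = '3' then '³' else tblUpTo 3 c) = tblUpTo 4 c := by
  by_cases h0 : c = '0'; · subst h0; decide
  by_cases h1 : c = '1'; · subst h1; decide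
  by_cases h2 : c = '2'; · subst h2; decide
  by_cases h3 : c = '3'; · subst h3; decide
  simp [tblUpTo, supDict, PySem.Dict.getD, PySem.Dict.get?, List.take, List.find?, h3,
    beq_eq_false_iff_ne.mpr (Ne.symm h0),
    beq_eq_false_iff_ne.mpr (Ne.symm h1),
    beq_eq_false_iff_ne.mpr (Ne.symm h2),
    beq_eq_false_iff_ne.mpr (Ne.symm h3)]

lemma step4 (c : Char) :
    (if tblUpTo 4 c = '4' then '⁴' else tblUpTo 4 c) = tblUpTo 5 c := by
  by_cases h0 : c = '0'; · subst h0; decide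
  by_cases h1 : c = '1'; · subst h1; decide
  by_cases h2 : c = '2'; · subst h2; decide
  by_cases h3 : c = '3'; · subst h3; decide
  by_cases h4 : c = '4'; · subst h4; decide
  simp [tblUpTo, supDict, PySem.Dict.getD, PySem.Dict.get?, List.take, List.find?, h4,
    beq_eq_false_iff_ne.mpr (Ne.symm h0),
    beq_eq_false_iff_ne.mpr (Ne.symm h1),
    beq_eq_false_iff_ne.mpr (Ne.symm h2),
    beq_eq_false_iff_ne.mpr (Ne.symm h3),
    beq_eq_false_iff_ne.mpr (Ne.symm h4)]

lemma step5 (c : Char) :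
    (if tblUpTo 5 c = '5' then '⁵' else tblUpTo 5 c) = tblUpTo 6 c := by
  by_cases h0 : c = '0'; · subst h0; decide
  by_cases h1 : c = '1'; · subst h1; decide
  by_cases h2 : c = '2'; · subst h2; decide
  by_cases h3 : c = '3'; · subst h3; decide
  by_cases h4 : c = '4'; · subst h4; decide
  by_cases h5 : c = '5'; · subst h5; decide
  simp [tblUpTo, supDict, PySem.Dict.getD, PySem.Dict.get?, List.take, List.find?, h5,
    beq_eq_false_iff_ne.mpr (Ne.symm h0),
    beq_eq_false_iff_ne.mpr (Ne.symm h1),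
    beq_eq_false_iff_ne.mpr (Ne.symm h2),
    beq_eq_false_iff_ne.mpr (Ne.symm h3),
    beq_eq_false_iff_ne.mpr (Ne.symm h4),
    beq_eq_false_iff_ne.mpr (Ne.symm h5)]

lemma step6 (c : Char) :
    (if tblUpTo 6 c = '6' then '⁶' else tblUpTo 6 c) = tblUpTo 7 c := by
  by_cases h0 : c = '0'; · subst h0; decide
  by_cases h1 : c = '1'; · subst h1; decide
  by_cases h2 : c = '2'; · subst h2; decide
  by_cases h3 : c = '3'; · subst h3; decide
  by_cases h4 : c = '4'; · subst h4; decide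
  by_cases h5 : c = '5'; · subst h5; decide
  by_cases h6 : c = '6'; · subst h6; decide
  simp [tblUpTo, supDict, PySem.Dict.getD, PySem.Dict.get?, List.take, List.find?, h6,
    beq_eq_false_iff_ne.mpr (Ne.symm h0),
    beq_eq_false_iff_ne.mpr (Ne.symm h1),
    beq_eq_false_iff_ne.mpr (Ne.symm h2),
    beq_eq_false_iff_ne.mpr (Ne.symm h3),
    beq_eq_false_iff_ne.mpr (Ne.symm h4),
    beq_eq_false_iff_ne.mpr (Ne.symm h5),
    beq_eq_false_iff_ne.mpr (Ne.symm h6)]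

lemma step7 (c : Char) :
    (if tblUpTo 7 c = '7' then '⁷' else tblUpTo 7 c) = tblUpTo 8 c := by
  by_cases h0 : c = '0'; · subst h0; decide
  by_cases h1 : c = '1'; · subst h1; decide
  by_cases h2 : c = '2'; · subst h2; decide
  by_cases h3 : c = '3'; · subst h3; decide
  by_cases h4 : c = '4'; · subst h4; decide
  by_cases h5 : c = '5'; · subst h5; decide
  by_cases h6 : c = '6'; · subst h6; decide
  by_cases h7 : c = '7'; · subst h7; decide
  simp [tblUpTo, supDict, PySem.Dict.getD, PySem.Dict.get?, List.take, List.find?, h7,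
    beq_eq_false_iff_ne.mpr (Ne.symm h0),
    beq_eq_false_iff_ne.mpr (Ne.symm h1),
    beq_eq_false_iff_ne.mpr (Ne.symm h2),
    beq_eq_false_iff_ne.mpr (Ne.symm h3),
    beq_eq_false_iff_ne.mpr (Ne.symm h4),
    beq_eq_false_iff_ne.mpr (Ne.symm h5),
    beq_eq_false_iff_ne.mpr (Ne.symm h6),
    beq_eq_false_iff_ne.mpr (Ne.symm h7)]

lemma step8 (c : Char) :
    (if tblUpTo 8 c = '8' then '⁸' else tblUpTo 8 c) = tblUpTo 9 c := by
  by_cases h0 : c = '0'; · subst h0; decide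
  by_cases h1 : c = '1'; · subst h1; decide
  by_cases h2 : c = '2'; · subst h2; decide
  by_cases h3 : c = '3'; · subst h3; decide
  by_cases h4 : c = '4'; · subst h4; decide
  by_cases h5 : c = '5'; · subst h5; decide
  by_cases h6 : c = '6'; · subst h6; decide
  by_cases h7 : c = '7'; · subst h7; decide
  by_cases h8 : c = '8'; · subst h8; decide
  simp [tblUpTo, supDict, PySem.Dict.getD, PySem.Dict.get?, List.take, List.find?, h8,
    beq_eq_false_iff_ne.mpr (Ne.symm h0),
    beq_eq_false_iff_ne.mpr (Ne.symm h1),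
    beq_eq_false_iff_ne.mpr (Ne.symm h2),
    beq_eq_false_iff_ne.mpr (Ne.symm h3),
    beq_eq_false_iff_ne.mpr (Ne.symm h4),
    beq_eq_false_iff_ne.mpr (Ne.symm h5),
    beq_eq_false_iff_ne.mpr (Ne.symm h6),
    beq_eq_false_iff_ne.mpr (Ne.symm h7),
    beq_eq_false_iff_ne.mpr (Ne.symm h8)]

lemma step9 (c : Char) :
    (if tblUpTo 9 c = '9' then '⁹' else tblUpTo 9 c) = tblUpTo 10 c := by
  by_cases h0 : c = '0'; · subst h0; decide
  by_cases h1 : c = '1'; · subst h1; decide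
  by_cases h2 : c = '2'; · subst h2; decide
  by_cases h3 : c = '3'; · subst h3; decide
  by_cases h4 : c = '4'; · subst h4; decide
  by_cases h5 : c = '5'; · subst h5; decide
  by_cases h6 : c = '6'; · subst h6; decide
  by_cases h7 : c = '7'; · subst h7; decide
  by_cases h8 : c = '8'; · subst h8; decide
  by_cases h9 : c = '9'; · subst h9; decide
  simp [tblUpTo, supDict, PySem.Dict.getD, PySem.Dict.get?, List.take, List.find?, h9,
    beq_eq_false_iff_ne.mpr (Ne.symm h0),
    beq_eq_false_iff_ne.mpr (Ne.symm h1),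
    beq_eq_false_iff_ne.mpr (Ne.symm h2),
    beq_eq_false_iff_ne.mpr (Ne.symm h3),
    beq_eq_false_iff_ne.mpr (Ne.symm h4),
    beq_eq_false_iff_ne.mpr (Ne.symm h5),
    beq_eq_false_iff_ne.mpr (Ne.symm h6),
    beq_eq_false_iff_ne.mpr (Ne.symm h7),
    beq_eq_false_iff_ne.mpr (Ne.symm h8),
    beq_eq_false_iff_ne.mpr (Ne.symm h9)]

lemma step10 (c : Char) :
    (if tblUpTo 10 c = '-' then '⁻' else tblUpTo 10 c) = tblUpTo 11 c := by
  by_cases h0 : c = '0'; · subst h0; decide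
  by_cases h1 : c = '1'; · subst h1; decide
  by_cases h2 : c = '2'; · subst h2; decide
  by_cases h3 : c = '3'; · subst h3; decide
  by_cases h4 : c = '4'; · subst h4; decide
  by_cases h5 : c = '5'; · subst h5; decide
  by_cases h6 : c = '6'; · subst h6; decide
  by_cases h7 : c = '7'; · subst h7; decide
  by_cases h8 : c = '8'; · subst h8; decide
  by_cases h9 : c = '9'; · subst h9; decide
  by_cases h10 : c = '-'; · subst h10; decide
  simp [tblUpTo, supDict, PySem.Dict.getD, PySem.Dict.get?, List.take, List.find?, h10,
    beq_eq_false_iff_ne.mpr (Ne.symm h0),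
    beq_eq_false_iff_ne.mpr (Ne.symm h1),
    beq_eq_false_iff_ne.mpr (Ne.symm h2),
    beq_eq_false_iff_ne.mpr (Ne.symm h3),
    beq_eq_false_iff_ne.mpr (Ne.symm h4),
    beq_eq_false_iff_ne.mpr (Ne.symm h5),
    beq_eq_false_iff_ne.mpr (Ne.symm h6),
    beq_eq_false_iff_ne.mpr (Ne.symm h7),
    beq_eq_false_iff_ne.mpr (Ne.symm h8),
    beq_eq_false_iff_ne.mpr (Ne.symm h9),
    beq_eq_false_iff_ne.mpr (Ne.symm h10)]

lemma step11 (c : Char) :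
    (if tblUpTo 11 c = '+' then '⁺' else tblUpTo 11 c) = tblUpTo 12 c := by
  by_cases h0 : c = '0'; · subst h0; decide
  by_cases h1 : c = '1'; · subst h1; decide
  by_cases h2 : c = '2'; · subst h2; decide
  by_cases h3 : c = '3'; · subst h3; decide
  by_cases h4 : c = '4'; · subst h4; decide
  by_cases h5 : c = '5'; · subst h5; decide
  by_cases h6 : c = '6'; · subst h6; decide
  by_cases h7 : c = '7'; · subst h7; decide
  by_cases h8 : c = '8'; · subst h8; decide
  by_cases h9 : c = '9'; · subst h9; decide
  by_cases h10 : c = '-'; · subst h10; decide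
  by_cases h11 : c = '+'; · subst h11; decide
  simp [tblUpTo, supDict, PySem.Dict.getD, PySem.Dict.get?, List.take, List.find?, h11,
    beq_eq_false_iff_ne.mpr (Ne.symm h0),
    beq_eq_false_iff_ne.mpr (Ne.symm h1),
    beq_eq_false_iff_ne.mpr (Ne.symm h2),
    beq_eq_false_iff_ne.mpr (Ne.symm h3),
    beq_eq_false_iff_ne.mpr (Ne.symm h4),
    beq_eq_false_iff_ne.mpr (Ne.symm h5),
    beq_eq_false_iff_ne.mpr (Ne.symm h6),
    beq_eq_false_iff_ne.mpr (Ne.symm h7),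
    beq_eq_false_iff_ne.mpr (Ne.symm h8),
    beq_eq_false_iff_ne.mpr (Ne.symm h9),
    beq_eq_false_iff_ne.mpr (Ne.symm h10),
    beq_eq_false_iff_ne.mpr (Ne.symm h11)]

-- ===== VERDICT (by name: the statement is the Claim_ definition above) =====
theorem superscript_number_spec : Claim_equal_superscript_number := by
  intro s _
  unfold Spec_superscript_number superscript_number superscript_number_alt
  by_cases hdot : PySem.Str.isIn "." s = true
  · rw [if_pos hdot, if_pos hdot]
  · rw [if_neg hdot, if_neg hdot]
    simp only [supItems, List.foldl]
    rw [← String.toList_inj]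
    simp only [PySem.Str.toList_replace, String.toList_ofList,
      show ("0" : String).toList = ['0'] from rfl,
      show ("⁰" : String).toList = ['⁰'] from rfl,
      show ("1" : String).toList = ['1'] from rfl,
      show ("¹" : String).toList = ['¹'] from rfl,
      show ("2" : String).toList = ['2'] from rfl,
      show ("²" : String).toList = ['²'] from rfl,
      show ("3" : String).toList = ['3'] from rfl,
      show ("³" : String).toList = ['³'] from rfl,
      show ("4" : String).toList = ['4'] from rfl,
      show ("⁴" : String).toList = ['⁴'] from rfl,
      show ("5" : String).toList = ['5'] from rfl,
      show ("⁵" : String).toList = ['⁵'] from rfl,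
      show ("6" : String).toList = ['6'] from rfl,
      show ("⁶" : String).toList = ['⁶'] from rfl,
      show ("7" : String).toList = ['7'] from rfl,
      show ("⁷" : String).toList = ['⁷'] from rfl,
      show ("8" : String).toList = ['8'] from rfl,
      show ("⁸" : String).toList = ['⁸'] from rfl,
      show ("9" : String).toList = ['9'] from rfl,
      show ("⁹" : String).toList = ['⁹'] from rfl,
      show ("-" : String).toList = ['-'] from rfl,
      show ("⁻" : String).toList = ['⁻'] from rfl,
      show ("+" : String).toList = ['+'] from rfl,
      show ("⁺" : String).toList = ['⁺'] from rfl]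
    simp only [replace_single]
    rw [List.map_congr_left (fun c _ => step0 c)]
    rw [map_step _ '1' '¹' (tblUpTo 1) (tblUpTo 2) step1]
    rw [map_step _ '2' '²' (tblUpTo 2) (tblUpTo 3) step2]
    rw [map_step _ '3' '³' (tblUpTo 3) (tblUpTo 4) step3]
    rw [map_step _ '4' '⁴' (tblUpTo 4) (tblUpTo 5) step4]
    rw [map_step _ '5' '⁵' (tblUpTo 5) (tblUpTo 6) step5]
    rw [map_step _ '6' '⁶' (tblUpTo 6) (tblUpTo 7) step6]
    rw [map_step _ '7' '⁷' (tblUpTo 7) (tblUpTo 8) step7]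
    rw [map_step _ '8' '⁸' (tblUpTo 8) (tblUpTo 9) step8]
    rw [map_step _ '9' '⁹' (tblUpTo 9) (tblUpTo 10) step9]
    rw [map_step _ '-' '⁻' (tblUpTo 10) (tblUpTo 11) step10]
    rw [map_step _ '+' '⁺' (tblUpTo 11) (tblUpTo 12) step11]
    exact List.map_congr_left (fun c _ => rfl)
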